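-- pv_equiv track=rewrite | github.com/pbjc/project-euler | Problem046.py | oddCompositeSieve
-- ===== SOURCE A (Python) =====
-- def oddCompositeSieve(bound):
--     sieve = [True] * bound
--     sieve[0] = sieve[1] = False
--     for (i, prime) in enumerate(sieve):
--         if prime:
--             for n in range(i * i, bound, i):
--                 sieve[n] = False
--         elif i % 2 == 1 and i > 1:
--             yield i
-- ===== SOURCE B (Python) =====
-- def oddCompositeSieve(bound):
--     for i in range(3, bound, 2):
--         d = 3
--         while d * d <= i:
--             if i % d == 0:
--                 yield i
--                 break
--             d += 2
-- ===== Notes on version B (the rewrite author's own statement) =====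
-- stated objective: alternative
-- what changed: A runs a Sieve of Eratosthenes over a shared boolean array and yields odd composites while sieving; B keeps no array at all and instead tests each odd candidate independently by trial division by odd divisors up to its square root.
import Mathlib
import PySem

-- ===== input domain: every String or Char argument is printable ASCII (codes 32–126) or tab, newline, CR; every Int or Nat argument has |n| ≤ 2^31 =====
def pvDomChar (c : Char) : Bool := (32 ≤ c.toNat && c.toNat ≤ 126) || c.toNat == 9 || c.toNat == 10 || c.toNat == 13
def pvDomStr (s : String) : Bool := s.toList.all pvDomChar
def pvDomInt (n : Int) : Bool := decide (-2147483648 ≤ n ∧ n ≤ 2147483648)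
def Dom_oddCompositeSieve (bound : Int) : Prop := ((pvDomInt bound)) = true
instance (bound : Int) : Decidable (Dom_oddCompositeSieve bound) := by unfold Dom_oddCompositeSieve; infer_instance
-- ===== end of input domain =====

-- B drops A's shared sieve array entirely: it tests each odd candidate independently by
-- trial division by odd divisors up to its square root (same yielded values, same order).

-- ===== PORT A =====
-- inner loop 'for n in range(i*i, bound, i): sieve[n] = False'
def pvMark (bound : Int) (s : List Bool) (i : Int) : List Bool :=
  (PySem.List.pyRange (i * i) bound i).foldl (fun t n => PySem.List.pySetD t n false) s

-- one step of A's 'for (i, prime) in enumerate(sieve)' loop (prime = current sieve[i])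
def pvStepA (bound : Int) (st : List Bool × List Int) (i : Int) : List Bool × List Int :=
  if PySem.List.pyGetD st.1 i false then
    (pvMark bound st.1 i, st.2)
  else if PySem.Int.mod i 2 = 1 ∧ 1 < i then
    (st.1, st.2 ++ [i])
  else st

-- enumerate over the list being mutated = index loop reading the current sieve; exact.
def oddCompositeSieve (bound : Int) : List Int :=
  let sieve := PySem.List.pySetD (PySem.List.pySetD (List.replicate bound.toNat true) 0 false) 1 false
  ((PySem.List.pyRange 0 (PySem.List.len sieve) 1).foldl (pvStepA bound) (sieve, [])).2

-- ===== PORT B =====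
-- B's inner 'while d * d <= i: if i % d == 0: yield i; break; d += 2' — returns true iff i is
-- yielded; the fuel only bounds the iteration count (it never runs out while d * d ≤ i, since
-- d grows by 2 per step), it changes nothing about the computation.
def pvTrialGo (i : Int) : Nat → Int → Bool
  | 0, _ => false
  | fuel + 1, d =>
    if d * d ≤ i then
      if PySem.Int.mod i d = 0 then true else pvTrialGo i fuel (d + 2)
    else false

def pvTrial (i d : Int) : Bool := pvTrialGo i (i + 2 - d).toNat d

def oddCompositeSieve_alt (bound : Int) : List Int :=
  (PySem.List.pyRange 3 bound 2).foldl
    (fun acc i => if pvTrial i 3 then acc ++ [i] else acc) []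

-- ===== PRECONDITION & SPEC =====
-- 'sieve[0] = sieve[1] = False' raises IndexError (in A) whenever bound < 2.
def Pre_oddCompositeSieve (bound : Int) : Prop := 2 ≤ bound
instance (bound : Int) : Decidable (Pre_oddCompositeSieve bound) := by
  unfold Pre_oddCompositeSieve; infer_instance
def pvWitness_oddCompositeSieve : Int := (30)

def Spec_oddCompositeSieve (bound : Int) (out : List Int) : Prop := out = oddCompositeSieve_alt bound
instance (bound : Int) (out : List Int) : Decidable (Spec_oddCompositeSieve bound out) := by unfold Spec_oddCompositeSieve; infer_instance

-- ===== CLAIM (what is proved, stated in full; the proofs are below) =====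
def Claim_equal_oddCompositeSieve : Prop := ∀ (bound : Int), Dom_oddCompositeSieve bound → Pre_oddCompositeSieve bound → Spec_oddCompositeSieve bound (oddCompositeSieve bound)

-- ===== LEMMAS AND PROOFS =====

-- proof-side description of A's sieve updates: the sieve after one enumerate step at index i
def pvStepB (bound : Int) (s : List Bool) (i : Int) : List Bool :=
  if PySem.List.pyGetD s i false then pvMark bound s i else s

-- the element A's loop body yields at index i when the sieve reads s there
def pvYield (s : List Bool) (i : Int) : List Int :=
  if PySem.List.pyGetD s i false = false ∧ PySem.Int.mod i 2 = 1 ∧ 1 < i then [i] else []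

-- the list A's fused loop yields over an index list, threading the sieve updates
def pvG (bound : Int) (s : List Bool) : List Int → List Int
  | [] => []
  | i :: t => pvYield s i ++ pvG bound (pvStepB bound s i) t

lemma pv_getD_setD_ne (xs : List Bool) (n j : Int) (hn : 0 ≤ n) (hj : 0 ≤ j) (hne : j ≠ n) :
    PySem.List.pyGetD (PySem.List.pySetD xs n false) j false = PySem.List.pyGetD xs j false := by
  obtain ⟨jn, rfl⟩ : ∃ m : Nat, j = (m : Int) := ⟨j.toNat, (Int.toNat_of_nonneg hj).symm⟩
  rw [PySem.List.pySetD_of_nonneg _ _ hn, PySem.List.pyGetD_natCast, PySem.List.pyGetD_natCast,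
    List.getD_eq_getElem?_getD, List.getD_eq_getElem?_getD, List.getElem?_set,
    if_neg (show ¬ n.toNat = jn by omega)]

lemma pv_getD_setD_self (xs : List Bool) (n : Int) (hn : 0 ≤ n) :
    PySem.List.pyGetD (PySem.List.pySetD xs n false) n false = false := by
  obtain ⟨m, rfl⟩ : ∃ m : Nat, n = (m : Int) := ⟨n.toNat, (Int.toNat_of_nonneg hn).symm⟩
  rw [PySem.List.pySetD_of_nonneg _ _ hn, PySem.List.pyGetD_natCast,
    List.getD_eq_getElem?_getD, List.getElem?_set]
  split_ifs <;> simp_all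

lemma pv_fold_set_stable (xs : List Bool) (l : List Int) (j : Int) (hj : 0 ≤ j)
    (hl : ∀ n ∈ l, j < n) :
    PySem.List.pyGetD (l.foldl (fun t n => PySem.List.pySetD t n false) xs) j false
      = PySem.List.pyGetD xs j false := by
  induction l generalizing xs with
  | nil => rfl
  | cons n t ih =>
    have hn : j < n := hl n (List.mem_cons_self ..)
    rw [List.foldl_cons, ih _ (fun m hm => hl m (List.mem_cons_of_mem _ hm)),
      pv_getD_setD_ne _ _ _ (by omega) hj (by omega)]

lemma pv_mark_stable (b : Int) (s : List Bool) (i j : Int) (hi : 2 ≤ i) (hj : 0 ≤ j)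
    (hji : j < i * i) :
    PySem.List.pyGetD (pvMark b s i) j false = PySem.List.pyGetD s j false := by
  unfold pvMark
  refine pv_fold_set_stable s _ j hj (fun n hn => ?_)
  rw [PySem.List.mem_pyRange_iff_of_pos (by omega)] at hn
  omega

lemma pv_stepB_stable (b : Int) (s : List Bool) (i j : Int) (hi : 2 ≤ i) (hj : 0 ≤ j)
    (hji : j < i * i) :
    PySem.List.pyGetD (pvStepB b s i) j false = PySem.List.pyGetD s j false := by
  unfold pvStepB
  split
  · exact pv_mark_stable b s i j hi hj hji
  · rfl

lemma pv_foldB_stable (b : Int) (l : List Int) (s : List Bool) (j : Int) (hj : 0 ≤ j)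
    (hl : ∀ i ∈ l, 2 ≤ i ∧ j < i * i) :
    PySem.List.pyGetD (l.foldl (pvStepB b) s) j false = PySem.List.pyGetD s j false := by
  induction l generalizing s with
  | nil => rfl
  | cons i t ih =>
    have hi := hl i (List.mem_cons_self ..)
    rw [List.foldl_cons, ih _ (fun m hm => hl m (List.mem_cons_of_mem _ hm)),
      pv_stepB_stable b s i j hi.1 hj hi.2]

lemma pv_step_split (b : Int) (s : List Bool) (acc : List Int) (i : Int) :
    pvStepA b (s, acc) i = (pvStepB b s i, acc ++ pvYield s i) := by
  unfold pvStepA pvStepB pvYield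
  by_cases h : PySem.List.pyGetD s i false = true
  all_goals simp [h]
  split <;> simp_all

lemma pv_foldA_split (b : Int) (l : List Int) (s : List Bool) (acc : List Int) :
    l.foldl (pvStepA b) (s, acc) = (l.foldl (pvStepB b) s, acc ++ pvG b s l) := by
  induction l generalizing s acc with
  | nil => simp [pvG]
  | cons i t ih => rw [List.foldl_cons, pv_step_split, ih, List.foldl_cons, pvG,
      List.append_assoc]

lemma pv_G_char (b : Int) (n : Nat) :
    ∀ (k : Int) (s : List Bool), 2 ≤ k → b - k ≤ n →
    pvG b s (PySem.List.pyRange k b 1)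
      = (PySem.List.pyRange k b 1).filterMap (fun i =>
          if PySem.List.pyGetD ((PySem.List.pyRange k b 1).foldl (pvStepB b) s) i false = false
              ∧ PySem.Int.mod i 2 = 1 ∧ 1 < i then some i else none) := by
  induction n with
  | zero =>
    intro k s hk hn
    rw [PySem.List.pyRange_one_eq_nil (by omega)]
    rfl
  | succ m ih =>
    intro k s hk hn
    by_cases hkb : b ≤ k
    · rw [PySem.List.pyRange_one_eq_nil hkb]; rfl
    · rw [PySem.List.pyRange_one_cons (by omega)]
      have hstable : PySem.List.pyGetD
          ((PySem.List.pyRange (k+1) b 1).foldl (pvStepB b) (pvStepB b s k)) k false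
          = PySem.List.pyGetD s k false := by
        rw [pv_foldB_stable b _ _ k (by omega) (fun i hi => by
          rw [PySem.List.mem_pyRange_one] at hi
          constructor
          · omega
          · nlinarith),
          pv_stepB_stable b s k k hk (by omega) (by nlinarith)]
      rw [List.foldl_cons, List.filterMap_cons, hstable]
      show pvYield s k ++ pvG b (pvStepB b s k) (PySem.List.pyRange (k+1) b 1) = _
      rw [ih (k+1) (pvStepB b s k) (by omega) (by omega)]
      unfold pvYield
      split <;> simp

-- pyRange with step 2 peels one element like step 1 does
lemma pv_pyRange_two_cons (a b : Int) (h : a < b) :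
    PySem.List.pyRange a b 2 = a :: PySem.List.pyRange (a + 2) b 2 := by
  rw [PySem.List.pyRange_of_pos a b (by omega), PySem.List.pyRange_of_pos (a+2) b (by omega),
    if_pos h]
  have hM : ((b - a + 2 - 1) / 2).toNat
      = (if a + 2 < b then ((b - (a + 2) + 2 - 1) / 2).toNat else 0) + 1 := by
    split <;> omega
  rw [hM, List.range_succ_eq_map, List.map_cons, List.map_map]
  refine List.cons_eq_cons.mpr ⟨by norm_num, ?_⟩
  apply List.map_congr_left
  intro x _
  simp only [Function.comp_apply]
  push_cast
  ring

lemma pv_pyRange_two_nil (a b : Int) (h : b ≤ a) :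
    PySem.List.pyRange a b 2 = [] := by
  rw [PySem.List.pyRange_of_pos _ _ (by omega)]
  simp [show ¬ (a < b) by omega]

-- the odd, >1 elements of range(k, b) are exactly range(k+1, b, 2) when k is even
lemma pv_filter_odds (b : Int) (g : Int → Bool) (n : Nat) :
    ∀ (k : Int), 2 ≤ k → PySem.Int.mod k 2 = 0 → b - k ≤ n →
    (PySem.List.pyRange k b 1).filterMap (fun i =>
        if g i = false ∧ PySem.Int.mod i 2 = 1 ∧ 1 < i then some i else none)
      = ((PySem.List.pyRange (k+1) b 2).filter (fun i => !g i)) := by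
  induction n with
  | zero =>
    intro k hk hke hn
    rw [PySem.List.pyRange_one_eq_nil (by omega), pv_pyRange_two_nil _ _ (by omega)]
    rfl
  | succ m ih =>
    intro k hk hke hn
    by_cases hkb : b ≤ k
    · rw [PySem.List.pyRange_one_eq_nil hkb, pv_pyRange_two_nil _ _ (by omega)]; rfl
    · have hke' : k % 2 = 0 := by
        rwa [PySem.Int.mod_eq_emod_of_pos (by omega)] at hke
      rw [PySem.List.pyRange_one_cons (show k < b by omega), List.filterMap_cons]
      have hkodd : ¬ (g k = false ∧ PySem.Int.mod k 2 = 1 ∧ 1 < k) := by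
        rintro ⟨-, h1, -⟩
        rw [PySem.Int.mod_eq_emod_of_pos (by omega)] at h1
        omega
      rw [if_neg hkodd]
      by_cases hkb1 : b ≤ k + 1
      · rw [PySem.List.pyRange_one_eq_nil hkb1, pv_pyRange_two_nil _ _ (by omega)]; rfl
      · rw [PySem.List.pyRange_one_cons (show k + 1 < b by omega), List.filterMap_cons]
        have hodd : PySem.Int.mod (k+1) 2 = 1 := by
          rw [PySem.Int.mod_eq_emod_of_pos (by omega)]; omega
        rw [pv_pyRange_two_cons _ _ (by omega), List.filter_cons]
        have ihe := ih (k+2) (by omega) (by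
          rw [PySem.Int.mod_eq_emod_of_pos (by omega)]; omega) (by omega)
        by_cases hg : g (k+1) = false
        · rw [if_pos ⟨hg, hodd, by omega⟩]
          simp only [show k+1+1 = k+2 by ring, show k+1+2 = k+2+1 by ring, ihe, hg]
          simp
        · have hg' : g (k+1) = true := by revert hg; cases g (k+1) <;> simp
          rw [if_neg (by simp [hg'])]
          simp only [show k+1+1 = k+2 by ring, show k+1+2 = k+2+1 by ring, ihe, hg']
          simp

-- the initialised sieve in cons normal form (bound ≥ 2)
lemma pv_init_eq (b : Int) (hb : 2 ≤ b) :
    PySem.List.pySetD (PySem.List.pySetD (List.replicate b.toNat true) 0 false) 1 false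
      = false :: false :: List.replicate (b.toNat - 2) true := by
  obtain ⟨n, hn⟩ : ∃ n, b.toNat = n + 2 := ⟨b.toNat - 2, by omega⟩
  rw [hn, PySem.List.pySetD_of_nonneg _ _ (by omega),
    PySem.List.pySetD_of_nonneg _ _ (by omega)]
  simp [List.replicate_succ]

lemma pv_init_getD (b j : Int) (h2 : 2 ≤ j) (hb : j < b) :
    PySem.List.pyGetD (false :: false :: List.replicate (b.toNat - 2) true) j false = true := by
  obtain ⟨k, rfl⟩ : ∃ k : Nat, j = ((k + 2 : Nat) : Int) := ⟨j.toNat - 2, by omega⟩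
  rw [PySem.List.pyGetD_natCast, List.getD_eq_getElem?_getD]
  simp only [List.getElem?_cons_succ, List.getElem?_replicate]
  rw [if_pos (by omega)]
  rfl

-- once a cell is false, folding further set-false operations keeps it false
lemma pv_setfold_false_persist (l : List Int) (xs : List Bool) (j : Int) (hj : 0 ≤ j)
    (hl : ∀ n ∈ l, 0 ≤ n) (h : PySem.List.pyGetD xs j false = false) :
    PySem.List.pyGetD (l.foldl (fun t n => PySem.List.pySetD t n false) xs) j false = false := by
  induction l generalizing xs with
  | nil => exact h
  | cons n t ih =>
    have hn : 0 ≤ n := hl n (List.mem_cons_self ..)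
    rw [List.foldl_cons]
    refine ih _ (fun m hm => hl m (List.mem_cons_of_mem _ hm)) ?_
    by_cases he : j = n
    · subst he; exact pv_getD_setD_self xs j hj
    · rw [pv_getD_setD_ne _ _ _ hn hj he]; exact h

lemma pv_setfold_false_mem (l : List Int) (xs : List Bool) (j : Int) (hj : 0 ≤ j)
    (hl : ∀ n ∈ l, 0 ≤ n) (hmem : j ∈ l) :
    PySem.List.pyGetD (l.foldl (fun t n => PySem.List.pySetD t n false) xs) j false = false := by
  induction l generalizing xs with
  | nil => cases hmem
  | cons n t ih =>
    rw [List.foldl_cons]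
    rcases List.mem_cons.mp hmem with he | ht
    · subst he
      exact pv_setfold_false_persist t _ j hj (fun m hm => hl m (List.mem_cons_of_mem _ hm))
        (pv_getD_setD_self xs j hj)
    · exact ih _ (fun m hm => hl m (List.mem_cons_of_mem _ hm)) ht

lemma pv_range_mark_nonneg (b i : Int) (hi : 2 ≤ i) :
    ∀ n ∈ PySem.List.pyRange (i * i) b i, 0 ≤ n := by
  intro n hn
  rw [PySem.List.mem_pyRange_iff_of_pos (by omega)] at hn
  nlinarith [hn.1]

lemma pv_mark_false_persist (b : Int) (s : List Bool) (i j : Int) (hi : 2 ≤ i) (hj : 0 ≤ j)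
    (h : PySem.List.pyGetD s j false = false) :
    PySem.List.pyGetD (pvMark b s i) j false = false :=
  pv_setfold_false_persist _ s j hj (pv_range_mark_nonneg b i hi) h

lemma pv_stepB_false_persist (b : Int) (s : List Bool) (i j : Int) (hi : 2 ≤ i) (hj : 0 ≤ j)
    (h : PySem.List.pyGetD s j false = false) :
    PySem.List.pyGetD (pvStepB b s i) j false = false := by
  unfold pvStepB
  split
  · exact pv_mark_false_persist b s i j hi hj h
  · exact h

lemma pv_foldB_false_persist (b : Int) (l : List Int) (s : List Bool) (j : Int) (hj : 0 ≤ j)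
    (hl : ∀ q ∈ l, 2 ≤ q) (h : PySem.List.pyGetD s j false = false) :
    PySem.List.pyGetD (l.foldl (pvStepB b) s) j false = false := by
  induction l generalizing s with
  | nil => exact h
  | cons i t ih =>
    rw [List.foldl_cons]
    exact ih _ (fun m hm => hl m (List.mem_cons_of_mem _ hm))
      (pv_stepB_false_persist b s i j (hl i (List.mem_cons_self ..)) hj h)

lemma pv_mark_marks (b : Int) (s : List Bool) (i j : Int) (hi : 2 ≤ i)
    (hmem : j ∈ PySem.List.pyRange (i * i) b i) :
    PySem.List.pyGetD (pvMark b s i) j false = false := by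
  have hj : 0 ≤ j := pv_range_mark_nonneg b i hi j hmem
  exact pv_setfold_false_mem _ s j hj (pv_range_mark_nonneg b i hi) hmem

-- a cell turned false by the fold either was false or has a small divisor among the indices
lemma pv_setfold_marked (l : List Int) (xs : List Bool) (j : Int) (hj : 0 ≤ j)
    (hl : ∀ n ∈ l, 0 ≤ n)
    (h : PySem.List.pyGetD (l.foldl (fun t n => PySem.List.pySetD t n false) xs) j false = false) :
    PySem.List.pyGetD xs j false = false ∨ j ∈ l := by
  induction l generalizing xs with
  | nil => exact Or.inl h
  | cons n t ih =>
    rw [List.foldl_cons] at h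
    rcases ih _ (fun m hm => hl m (List.mem_cons_of_mem _ hm)) h with h' | h'
    · by_cases he : j = n
      · exact Or.inr (he ▸ List.mem_cons_self ..)
      · rw [pv_getD_setD_ne _ _ _ (hl n (List.mem_cons_self ..)) hj he] at h'
        exact Or.inl h'
    · exact Or.inr (List.mem_cons_of_mem _ h')

lemma pv_mark_marked (b : Int) (s : List Bool) (i j : Int) (hi : 2 ≤ i) (hj : 0 ≤ j)
    (h : PySem.List.pyGetD (pvMark b s i) j false = false) :
    PySem.List.pyGetD s j false = false ∨ (i ∣ j ∧ i * i ≤ j) := by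
  rcases pv_setfold_marked _ s j hj (pv_range_mark_nonneg b i hi) h with h' | h'
  · exact Or.inl h'
  · rw [PySem.List.mem_pyRange_iff_of_pos (by omega)] at h'
    refine Or.inr ⟨?_, h'.1⟩
    have : i ∣ j - i * i := h'.2.2
    have h2 : i ∣ i * i := Dvd.intro i rfl
    have := dvd_add this h2
    rwa [sub_add_cancel] at this

lemma pv_stepB_marked (b : Int) (s : List Bool) (i j : Int) (hi : 2 ≤ i) (hj : 0 ≤ j)
    (h : PySem.List.pyGetD (pvStepB b s i) j false = false) :
    PySem.List.pyGetD s j false = false ∨ (i ∣ j ∧ i * i ≤ j) := by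
  unfold pvStepB at h
  split at h
  · exact pv_mark_marked b s i j hi hj h
  · exact Or.inl h

lemma pv_foldB_marked (b : Int) (l : List Int) (s : List Bool) (j : Int) (hj : 0 ≤ j)
    (hl : ∀ q ∈ l, 2 ≤ q)
    (h : PySem.List.pyGetD (l.foldl (pvStepB b) s) j false = false) :
    PySem.List.pyGetD s j false = false ∨ ∃ q ∈ l, q ∣ j ∧ q * q ≤ j := by
  induction l generalizing s with
  | nil => exact Or.inl h
  | cons i t ih =>
    rw [List.foldl_cons] at h
    rcases ih _ (fun m hm => hl m (List.mem_cons_of_mem _ hm)) h with h' | h'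
    · rcases pv_stepB_marked b s i j (hl i (List.mem_cons_self ..)) hj h' with h'' | h''
      · exact Or.inl h''
      · exact Or.inr ⟨i, List.mem_cons_self .., h''⟩
    · obtain ⟨q, hq, hqd⟩ := h'
      exact Or.inr ⟨q, List.mem_cons_of_mem _ hq, hqd⟩

-- a number with no small divisor survives the whole fold as true
lemma pv_prime_true (b : Int) (l : List Int) (s : List Bool) (p : Int) (hp : 0 ≤ p)
    (hprime : ∀ q : Int, 2 ≤ q → q ∣ p → q * q ≤ p → False)
    (hl : ∀ q ∈ l, 2 ≤ q) (hs : PySem.List.pyGetD s p false = true) :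
    PySem.List.pyGetD (l.foldl (pvStepB b) s) p false = true := by
  by_contra hc
  have hfalse : PySem.List.pyGetD (l.foldl (pvStepB b) s) p false = false := by
    revert hc; cases PySem.List.pyGetD (l.foldl (pvStepB b) s) p false <;> simp
  rcases pv_foldB_marked b l s p hp hl hfalse with h | ⟨q, hq, hqd, hqs⟩
  · rw [hs] at h; cases h
  · exact hprime q (hl q hq) hqd hqs

-- composite numbers (with a divisor d, 2 ≤ d, d² ≤ i) end up false after the full fold
lemma pv_composite_marked (b i : Int) (_hb : 2 ≤ b) (hi : 2 ≤ i) (hib : i < b)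
    (hcomp : ∃ d : Int, 2 ≤ d ∧ d * d ≤ i ∧ d ∣ i) :
    PySem.List.pyGetD
      ((PySem.List.pyRange 2 b 1).foldl (pvStepB b)
        (false :: false :: List.replicate (b.toNat - 2) true)) i false = false := by
  obtain ⟨d, hd2, hdd, hdvd⟩ := hcomp
  -- pass to Nat and take the least prime factor
  set n := i.toNat with hn
  have hin : i = (n : Int) := by omega
  have hd0 : d = ((d.toNat : Nat) : Int) := by omega
  have hdvdN : d.toNat ∣ n := by
    rw [hin, hd0] at hdvd; exact_mod_cast hdvd
  have hddN : d.toNat * d.toNat ≤ n := by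
    have : ((d.toNat * d.toNat : Nat) : Int) ≤ (n : Int) := by push_cast; rw [← hd0, ← hin]; exact hdd
    exact_mod_cast this
  have hn2 : 2 ≤ n := by omega
  have hnotp : ¬ Nat.Prime n := by
    intro hp
    rcases hp.eq_one_or_self_of_dvd d.toNat hdvdN with h | h
    · omega
    · rw [h] at hddN
      have h2n : 2 * n ≤ n * n := Nat.mul_le_mul_right n hn2
      omega
  have hn1 : n ≠ 1 := by omega
  have hpprime := Nat.minFac_prime hn1
  have hpdvd := Nat.minFac_dvd n
  have hpsq : n.minFac * n.minFac ≤ n := by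
    have := Nat.minFac_sq_le_self (by omega : 0 < n) hnotp
    rwa [pow_two] at this
  have hp2 : (2:Int) ≤ (n.minFac : Int) := by exact_mod_cast hpprime.two_le
  have hpdvdI : ((n.minFac : Nat) : Int) ∣ i := by rw [hin]; exact_mod_cast hpdvd
  have hpsqI : ((n.minFac : Nat) : Int) * ((n.minFac : Nat) : Int) ≤ i := by
    rw [hin]; exact_mod_cast hpsq
  set p : Int := (n.minFac : Int) with hpdef
  have hpb : p < b := by nlinarith
  -- split the fold at p
  rw [PySem.List.pyRange_one_append 2 p b hp2 (by omega),
    PySem.List.pyRange_one_cons (show p < b by omega), List.foldl_append, List.foldl_cons]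
  set s1 := (PySem.List.pyRange 2 p 1).foldl (pvStepB b)
    (false :: false :: List.replicate (b.toNat - 2) true) with hs1
  have hs1p : PySem.List.pyGetD s1 p false = true := by
    refine pv_prime_true b _ _ p (by omega) ?_
      (fun q hq => (PySem.List.mem_pyRange_one.mp hq).1) (pv_init_getD b p hp2 hpb)
    intro q hq2 hqdvd hqsq
    have hq0 : q = ((q.toNat : Nat) : Int) := by omega
    have hqdvdN : q.toNat ∣ n.minFac := by
      rw [hpdef, hq0] at hqdvd; exact_mod_cast hqdvd
    rcases hpprime.eq_one_or_self_of_dvd q.toNat hqdvdN with h | h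
    · omega
    · have : q = p := by omega
      subst this
      nlinarith
  have hstep : pvStepB b s1 p = pvMark b s1 p := by unfold pvStepB; rw [if_pos hs1p]
  rw [hstep]
  refine pv_foldB_false_persist b _ _ i (by omega)
    (fun q hq => by have := (PySem.List.mem_pyRange_one.mp hq).1; omega) ?_
  refine pv_mark_marks b s1 p i hp2 ?_
  rw [PySem.List.mem_pyRange_iff_of_pos (by omega)]
  refine ⟨hpsqI, hib, ?_⟩
  exact dvd_sub hpdvdI (Dvd.intro p rfl)

-- the final sieve cell i (2 ≤ i < b) is false exactly when i has a divisor d with 2 ≤ d, d² ≤ i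
lemma pv_final_char (b i : Int) (hb : 2 ≤ b) (hi : 2 ≤ i) (hib : i < b) :
    (PySem.List.pyGetD
        ((PySem.List.pyRange 2 b 1).foldl (pvStepB b)
          (false :: false :: List.replicate (b.toNat - 2) true)) i false = false)
      ↔ ∃ d : Int, 2 ≤ d ∧ d * d ≤ i ∧ d ∣ i := by
  constructor
  · intro h
    rcases pv_foldB_marked b _ _ i (by omega)
        (fun q hq => (PySem.List.mem_pyRange_one.mp hq).1) h with h' | ⟨q, hq, hqd, hqs⟩
    · rw [pv_init_getD b i hi hib] at h'; cases h'
    · exact ⟨q, (PySem.List.mem_pyRange_one.mp hq).1, hqs, hqd⟩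
  · exact pv_composite_marked b i hb hi hib

-- characterisation of B's trial-division loop (any sufficient fuel gives the same answer)
lemma pv_trial_iff (i : Int) (n : Nat) :
    ∀ d : Int, 3 ≤ d → i + 2 - d ≤ (n : Int) →
    (pvTrialGo i n d = true ↔ ∃ e : Int, d ≤ e ∧ 2 ∣ (e - d) ∧ e * e ≤ i ∧ e ∣ i) := by
  induction n with
  | zero =>
    intro d hd hn
    have hdd : ¬ (d * d ≤ i) := by nlinarith [show i ≤ d - 2 by omega]
    simp only [pvTrialGo, Bool.false_eq_true, false_iff]
    rintro ⟨e, hde, -, hee, -⟩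
    nlinarith
  | succ m ih =>
    intro d hd hn
    by_cases hdd : d * d ≤ i
    · have hdi : d ≤ i := by nlinarith
      rw [show pvTrialGo i (m + 1) d
          = (if d * d ≤ i then
              if PySem.Int.mod i d = 0 then true else pvTrialGo i m (d + 2)
            else false) from rfl,
        if_pos hdd]
      by_cases hm : PySem.Int.mod i d = 0
      · rw [if_pos hm]
        simp only [true_iff]
        exact ⟨d, le_refl d, by omega, hdd, (PySem.Int.mod_eq_zero_iff_dvd i d).mp hm⟩
      · rw [if_neg hm]
        have hnd : ¬ d ∣ i := fun h => hm ((PySem.Int.mod_eq_zero_iff_dvd i d).mpr h)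
        rw [ih (d + 2) (by omega) (by omega)]
        constructor
        · rintro ⟨e, hde, hpar, hee, hdv⟩
          exact ⟨e, by omega, by omega, hee, hdv⟩
        · rintro ⟨e, hde, hpar, hee, hdv⟩
          have hne : e ≠ d := fun h => hnd (h ▸ hdv)
          exact ⟨e, by omega, by omega, hee, hdv⟩
    · rw [show pvTrialGo i (m + 1) d
          = (if d * d ≤ i then
              if PySem.Int.mod i d = 0 then true else pvTrialGo i m (d + 2)
            else false) from rfl,
        if_neg hdd]
      simp only [Bool.false_eq_true, false_iff]
      rintro ⟨e, hde, -, hee, -⟩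
      nlinarith

-- for odd i ≥ 3, the trial loop yields i exactly when i has a divisor d, 2 ≤ d, d² ≤ i
lemma pv_trial3 (i : Int) (hodd : i % 2 = 1) (h3 : 3 ≤ i) :
    pvTrial i 3 = true ↔ ∃ d : Int, 2 ≤ d ∧ d * d ≤ i ∧ d ∣ i := by
  rw [show pvTrial i 3 = pvTrialGo i (i + 2 - 3).toNat 3 from rfl,
    pv_trial_iff i (i + 2 - 3).toNat 3 (by norm_num) (by omega)]
  constructor
  · rintro ⟨e, he3, -, hee, hdv⟩
    exact ⟨e, by omega, hee, hdv⟩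
  · rintro ⟨d, hd2, hdd, hdvd⟩
    set n := i.toNat with hn
    have hin : i = (n : Int) := by omega
    have hnodd : n % 2 = 1 := by omega
    have hdvdN : d.toNat ∣ n := by
      have hd0 : d = ((d.toNat : Nat) : Int) := by omega
      rw [hin, hd0] at hdvd; exact_mod_cast hdvd
    have hddN : d.toNat * d.toNat ≤ n := by
      have hd' : ((d.toNat : Nat) : Int) = d := by omega
      have : ((d.toNat * d.toNat : Nat) : Int) ≤ (n : Int) := by
        push_cast
        rw [hd', ← hin]
        exact hdd
      exact_mod_cast this
    have hn2 : 2 ≤ n := by omega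
    have hnotp : ¬ Nat.Prime n := by
      intro hp
      rcases hp.eq_one_or_self_of_dvd d.toNat hdvdN with h | h
      · omega
      · rw [h] at hddN
        have h2n : 2 * n ≤ n * n := Nat.mul_le_mul_right n hn2
        omega
    have hpprime := Nat.minFac_prime (show n ≠ 1 by omega)
    have hpdvd := Nat.minFac_dvd n
    have hpsq : n.minFac * n.minFac ≤ n := by
      have := Nat.minFac_sq_le_self (by omega : 0 < n) hnotp
      rwa [pow_two] at this
    have hp2 : 2 ≤ n.minFac := hpprime.two_le
    have hpne2 : n.minFac ≠ 2 := by
      intro h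
      have : 2 ∣ n := h ▸ hpdvd
      omega
    have hpodd : n.minFac % 2 = 1 := by
      rcases Nat.even_or_odd n.minFac with he | ho
      · obtain ⟨k, hk⟩ := he
        have : 2 ∣ n := dvd_trans ⟨k, by omega⟩ hpdvd
        omega
      · obtain ⟨k, hk⟩ := ho
        omega
    refine ⟨(n.minFac : Int), by exact_mod_cast (by omega : 3 ≤ n.minFac), ?_, ?_, ?_⟩
    · omega
    · rw [hin]; exact_mod_cast hpsq
    · rw [hin]; exact_mod_cast hpdvd

lemma pv_foldl_keep_if (g : Int → Bool) (l : List Int) :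
    l.foldl (fun acc i => if g i then acc ++ [i] else acc) [] = l.filter g := by
  have h : (fun (acc : List Int) i => if g i then acc ++ [i] else acc)
      = (fun acc i => if g i then acc ++ [id i] else acc) := rfl
  rw [h, PySem.List.foldl_append_if]
  simp

-- ===== VERDICT (by name: the statement is the Claim_ definition above) =====
theorem oddCompositeSieve_spec : Claim_equal_oddCompositeSieve := by
  intro bound _ hpre
  have hb : 2 ≤ bound := hpre
  unfold Spec_oddCompositeSieve
  simp only [oddCompositeSieve, oddCompositeSieve_alt]
  rw [pv_init_eq bound hb]
  set init : List Bool := false :: false :: List.replicate (bound.toNat - 2) true with hinit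
  have hlen : PySem.List.len init = bound := by
    simp [PySem.List.len_eq, hinit]; omega
  rw [hlen]
  have hget0 : PySem.List.pyGetD init 0 false = false := by
    rw [hinit, PySem.List.pyGetD_zero_cons]
  have hget1 : PySem.List.pyGetD init 1 false = false := by
    rw [hinit, show (1:Int) = ((1:Nat):Int) by norm_num, PySem.List.pyGetD_natCast]
    rfl
  have hstep0 : pvStepA bound (init, []) 0 = (init, []) := by
    unfold pvStepA
    rw [if_neg (by simp [hget0]), if_neg (by decide)]
  have hstep1 : pvStepA bound (init, []) 1 = (init, []) := by
    unfold pvStepA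
    rw [if_neg (by simp [hget1]), if_neg (by decide)]
  rw [PySem.List.pyRange_one_cons (show (0:Int) < bound by omega),
    show (0:Int) + 1 = 1 by norm_num,
    PySem.List.pyRange_one_cons (show (1:Int) < bound by omega),
    show (1:Int) + 1 = 2 by norm_num,
    List.foldl_cons, hstep0, List.foldl_cons, hstep1, pv_foldA_split]
  simp only [List.nil_append]
  rw [pv_G_char bound (bound - 2).toNat 2 init (by omega) (by omega)]
  rw [pv_filter_odds bound (fun i => PySem.List.pyGetD
      ((PySem.List.pyRange 2 bound 1).foldl (pvStepB bound) init) i false)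
      (bound - 2).toNat 2 (by omega) (by decide) (by omega)]
  rw [pv_foldl_keep_if]
  refine List.filter_congr (fun i hi => ?_)
  rw [PySem.List.mem_pyRange_iff_of_pos (by omega : (0:Int) < 2)] at hi
  obtain ⟨h3, hib, hpar⟩ := hi
  have hodd : i % 2 = 1 := by omega
  have hchar := pv_final_char bound i hb (by omega) hib
  have htrial := pv_trial3 i hodd (by omega)
  by_cases hc : ∃ d : Int, 2 ≤ d ∧ d * d ≤ i ∧ d ∣ i
  · rw [hchar.mpr hc, htrial.mpr hc]; rfl
  · have h1 : PySem.List.pyGetD ((PySem.List.pyRange 2 bound 1).foldl (pvStepB bound) init) i false = true := by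
      by_contra hcc
      exact hc (hchar.mp (by revert hcc; cases PySem.List.pyGetD ((PySem.List.pyRange 2 bound 1).foldl (pvStepB bound) init) i false <;> simp))
    have h2 : pvTrial i 3 = false := by
      by_contra hcc
      exact hc (htrial.mp (by revert hcc; cases pvTrial i 3 <;> simp))
    rw [h1, h2]; rfl
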